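-- pv_equiv track=rewrite | github.com/ianepreston/scratch | advent_2021/10/day10.py | score_completion
-- ===== SOURCE A (Python) =====
-- from typing import Generator, List
--
-- def score_completion(completed_brackets: List[str]) -> int:
--     """Do the weird bracket closing scoring."""
--     point_map = {
--         ")": 1,
--         "]": 2,
--         "}": 3,
--         ">": 4,
--     }
--     total_score = 0
--     for bracket in completed_brackets:
--         total_score = total_score * 5
--         total_score += point_map[bracket]
--     return total_score
-- ===== SOURCE B (Python) =====
-- def score_completion(completed_brackets):
--     """Do the weird bracket closing scoring."""
--     point_map = {
--         ")": 1,
--         "]": 2,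
--         "}": 3,
--         ">": 4,
--     }
--     return sum(point_map[b] * 5 ** i for i, b in enumerate(reversed(completed_brackets)))
-- ===== Notes on version B (the rewrite author's own statement) =====
-- stated objective: alternative
-- what changed: Replaces the Horner multiply-accumulate loop by a direct positional power sum over the reversed list (point_map[b] * 5**i).
import Mathlib
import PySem

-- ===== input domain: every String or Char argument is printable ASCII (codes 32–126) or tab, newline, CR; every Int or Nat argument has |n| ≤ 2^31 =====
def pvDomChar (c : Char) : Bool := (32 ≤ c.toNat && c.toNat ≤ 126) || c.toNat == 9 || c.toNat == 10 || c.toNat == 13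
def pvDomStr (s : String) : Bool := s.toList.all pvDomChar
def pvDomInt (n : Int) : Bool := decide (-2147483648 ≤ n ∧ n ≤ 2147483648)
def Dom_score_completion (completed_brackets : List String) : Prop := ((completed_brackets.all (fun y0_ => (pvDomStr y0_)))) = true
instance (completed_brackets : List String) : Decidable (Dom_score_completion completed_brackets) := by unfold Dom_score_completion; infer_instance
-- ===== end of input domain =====

-- B replaces A's Horner multiply-accumulate loop by a positional power sum over the reversed list (alternative decomposition, same cost).


-- ===== PORT A =====
-- point_map as an association list (Python dict, insertion order)
def pvPointMap : PySem.Dict String Int := PySem.Dict.ofList [(")", 1), ("]", 2), ("}", 3), (">", 4)]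

-- A's loop: total = total * 5; total += point_map[bracket].
-- point_map[bracket] raises KeyError for other strings; those inputs are excluded by Pre_,
-- so the getD 0 default is never reached on admitted inputs.
def score_completion (completed_brackets : List String) : Int :=
  completed_brackets.foldl (fun total b => total * 5 + (PySem.Dict.get? pvPointMap b).getD 0) 0

-- ===== PORT B =====
-- B: sum of point_map[b] * 5**i over enumerate(reversed(completed_brackets)),
-- written as index-carrying recursion over the reversed list.
def scGo (i : Nat) (ys : List String) : Int :=
  match ys with
  | [] => 0
  | b :: rest => (PySem.Dict.get? pvPointMap b).getD 0 * 5 ^ i + scGo (i + 1) rest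

def score_completion_alt (completed_brackets : List String) : Int :=
  scGo 0 completed_brackets.reverse

-- ===== PRECONDITION & SPEC =====
-- Pre_ excludes exactly the inputs where Python's point_map[bracket] raises KeyError (both A and B raise there).
def Pre_score_completion (completed_brackets : List String) : Prop :=
  ∀ b ∈ completed_brackets, b ∈ [")", "]", "}", ">"]
instance (completed_brackets : List String) : Decidable (Pre_score_completion completed_brackets) := by
  unfold Pre_score_completion; infer_instance

def pvWitness_score_completion : List String := [")", "]", "}", ">", ")"]

def Spec_score_completion (completed_brackets : List String) (out : Int) : Prop := out = score_completion_alt completed_brackets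
instance (completed_brackets : List String) (out : Int) : Decidable (Spec_score_completion completed_brackets out) := by unfold Spec_score_completion; infer_instance

-- ===== CLAIM (what is proved, stated in full; the proofs are below) =====
def Claim_equal_score_completion : Prop := ∀ (completed_brackets : List String), Dom_score_completion completed_brackets → Pre_score_completion completed_brackets → Spec_score_completion completed_brackets (score_completion completed_brackets)

-- ===== LEMMAS AND PROOFS =====
theorem scGo_append (zs : List String) (b : String) (i : Nat) :
    scGo i (zs ++ [b]) = scGo i zs + (PySem.Dict.get? pvPointMap b).getD 0 * 5 ^ (i + zs.length) := by
  induction zs generalizing i with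
  | nil => simp [scGo]
  | cons x xs ih =>
    simp [scGo, ih (i + 1), List.length_cons]
    ring_nf

theorem horner_eq_go (xs : List String) (a : Int) :
    xs.foldl (fun total b => total * 5 + (PySem.Dict.get? pvPointMap b).getD 0) a
      = a * 5 ^ xs.length + scGo 0 xs.reverse := by
  induction xs generalizing a with
  | nil => simp [scGo]
  | cons x xs ih =>
    simp only [List.foldl_cons, List.reverse_cons, List.length_cons]
    rw [ih, scGo_append]
    simp [List.length_reverse]
    ring

-- ===== VERDICT (by name: the statement is the Claim_ definition above) =====
theorem score_completion_spec : Claim_equal_score_completion := by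
  intro xs _ _
  show _ = _
  unfold score_completion score_completion_alt
  rw [horner_eq_go]
  simp
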